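-- pv_equiv track=rewrite | github.com/dmoratz/cit5900_project | Project_3/Part_2/api_integration.py | chunk_terms_by_char_limit
-- ===== SOURCE A (Python) =====
-- def chunk_terms_by_char_limit(terms, max_length=1000):
--     """
--     Splits a list of terms into chunks so that the OR-joined query string
--     (each term quoted) is less than or equal to max_length characters.
--     """
--     chunks = []
--     current_chunk = []
--     current_length = 0
--
--     for term in terms:
--         quoted_term = f'"{term}"'
--         add_length = len(quoted_term) + (4 if current_chunk else 0)  # includes " OR "
--         if current_length + add_length > max_length:
--             if current_chunk:
--                 chunks.append(current_chunk)
--             current_chunk = [term]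
--             current_length = len(quoted_term)
--         else:
--             current_chunk.append(term)
--             current_length += add_length
--
--     if current_chunk:
--         chunks.append(current_chunk)
--
--     return chunks
-- ===== SOURCE B (Python) =====
-- def chunk_terms_by_char_limit(terms, max_length=1000):
--     """Greedy chunking that recomputes the real joined-query length of the
--     candidate chunk each step instead of threading a running-length counter."""
--     def joined_len(chunk):
--         return len(' OR '.join(f'"{t}"' for t in chunk))
--
--     chunks = []
--     current = []
--     for term in terms:
--         if current and joined_len(current + [term]) > max_length:
--             chunks.append(current)
--             current = [term]
--         else:
--             current = current + [term]
--     if current: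
--         chunks.append(current)
--     return chunks
-- ===== Notes on version B (the rewrite author's own statement) =====
-- stated objective: simpler
-- what changed: B drops the running-length accumulator and the quoted-term/add_length bookkeeping entirely: each step it recomputes the real joined query length of the candidate chunk (len(' OR '.join(f'"{t}"' ...))) and flushes only on a non-empty chunk that would overflow.
import Mathlib
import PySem

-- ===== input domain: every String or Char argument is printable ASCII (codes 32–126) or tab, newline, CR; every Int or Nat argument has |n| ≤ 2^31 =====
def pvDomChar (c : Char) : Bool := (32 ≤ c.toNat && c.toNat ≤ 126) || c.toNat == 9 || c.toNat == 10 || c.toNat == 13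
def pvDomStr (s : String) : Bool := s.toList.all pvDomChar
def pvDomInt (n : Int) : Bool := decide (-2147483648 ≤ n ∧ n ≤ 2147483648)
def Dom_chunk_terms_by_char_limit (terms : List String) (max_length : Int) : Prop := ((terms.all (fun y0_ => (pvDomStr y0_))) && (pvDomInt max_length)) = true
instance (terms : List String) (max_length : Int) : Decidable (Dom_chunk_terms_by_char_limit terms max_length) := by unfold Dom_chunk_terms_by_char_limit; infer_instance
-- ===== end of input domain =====

-- B replaces A's running-length accumulator by recomputing the actual joined query
-- length of the candidate chunk each step (objective: simpler decomposition).

-- ===== PORT A =====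
def pvStepA (max_length : Int) (st : List (List String) × List String × Int)
    (term : String) : List (List String) × List String × Int :=
  let chunks := st.1
  let current_chunk := st.2.1
  let current_length := st.2.2
  let quoted_term := "\"" ++ term ++ "\""
  let add_length : Int := PySem.Str.len quoted_term + (if current_chunk ≠ [] then 4 else 0)
  if current_length + add_length > max_length then
    ((if current_chunk ≠ [] then chunks ++ [current_chunk] else chunks),
      [term], PySem.Str.len quoted_term)
  else
    (chunks, current_chunk ++ [term], current_length + add_length)

def chunk_terms_by_char_limit (terms : List String) (max_length : Int) : List (List String) :=
  let st := terms.foldl (pvStepA max_length) ([], [], 0)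
  if st.2.1 ≠ [] then st.1 ++ [st.2.1] else st.1

-- ===== PORT B =====
-- len(' OR '.join(f'"{t}"' for t in chunk))
def pvJoinedLen (chunk : List String) : Int :=
  PySem.Str.len (PySem.Str.join " OR " (chunk.map (fun t => "\"" ++ t ++ "\"")))

def pvStepB (max_length : Int) (st : List (List String) × List String)
    (term : String) : List (List String) × List String :=
  if st.2 ≠ [] ∧ pvJoinedLen (st.2 ++ [term]) > max_length then
    (st.1 ++ [st.2], [term])
  else
    (st.1, st.2 ++ [term])

def chunk_terms_by_char_limit_alt (terms : List String) (max_length : Int) : List (List String) :=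
  let st := terms.foldl (pvStepB max_length) ([], [])
  if st.2 ≠ [] then st.1 ++ [st.2] else st.1

-- ===== PRECONDITION & SPEC =====
def Spec_chunk_terms_by_char_limit (terms : List String) (max_length : Int) (out : List (List String)) : Prop := out = chunk_terms_by_char_limit_alt terms max_length
instance (terms : List String) (max_length : Int) (out : List (List String)) : Decidable (Spec_chunk_terms_by_char_limit terms max_length out) := by unfold Spec_chunk_terms_by_char_limit; infer_instance

-- ===== CLAIM (what is proved, stated in full; the proofs are below) =====
def Claim_equal_chunk_terms_by_char_limit : Prop := ∀ (terms : List String) (max_length : Int), Dom_chunk_terms_by_char_limit terms max_length → Spec_chunk_terms_by_char_limit terms max_length (chunk_terms_by_char_limit terms max_length)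

-- ===== LEMMAS AND PROOFS =====

theorem pv_join_append_singleton (sep p : List Char) (ps : List (List Char)) (h : ps ≠ []) :
    PySem.Chars.join sep (ps ++ [p]) = PySem.Chars.join sep ps ++ sep ++ p := by
  induction ps with
  | nil => exact absurd rfl h
  | cons q rest ih =>
    cases rest with
    | nil => simp [PySem.Chars.join_cons_cons, PySem.Chars.join_singleton]
    | cons r rest' =>
      calc PySem.Chars.join sep ((q :: r :: rest') ++ [p])
          = q ++ sep ++ PySem.Chars.join sep ((r :: rest') ++ [p]) :=
            PySem.Chars.join_cons_cons sep q r (rest' ++ [p])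
        _ = q ++ sep ++ (PySem.Chars.join sep (r :: rest') ++ sep ++ p) := by
            rw [ih (by simp)]
        _ = PySem.Chars.join sep (q :: r :: rest') ++ sep ++ p := by
            rw [PySem.Chars.join_cons_cons]
            simp [List.append_assoc]

theorem pvJoinedLen_nil : pvJoinedLen [] = 0 := by
  simp [pvJoinedLen, PySem.Str.len_eq, PySem.Str.toList_join, PySem.Chars.join_nil]

theorem pvJoinedLen_singleton (t : String) :
    pvJoinedLen [t] = PySem.Str.len ("\"" ++ t ++ "\"") := by
  simp [pvJoinedLen, PySem.Str.len_eq, PySem.Str.toList_join, PySem.Chars.join_singleton]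

theorem pvJoinedLen_append (cur : List String) (t : String) (h : cur ≠ []) :
    pvJoinedLen (cur ++ [t]) = pvJoinedLen cur + 4 + PySem.Str.len ("\"" ++ t ++ "\"") := by
  have hmap : (cur.map (fun t => "\"" ++ t ++ "\"")).map String.toList ≠ [] := by
    simpa using h
  simp only [pvJoinedLen, PySem.Str.len_eq, PySem.Str.toList_join, List.map_append,
    List.map_cons, List.map_nil]
  rw [pv_join_append_singleton _ _ _ hmap]
  simp only [List.length_append]
  push_cast
  norm_num

theorem pv_step_eq (max_length : Int) (chunks : List (List String)) (cur : List String)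
    (t : String) :
    pvStepA max_length (chunks, cur, pvJoinedLen cur) t =
      ((pvStepB max_length (chunks, cur) t).1,
       (pvStepB max_length (chunks, cur) t).2,
       pvJoinedLen ((pvStepB max_length (chunks, cur) t).2)) := by
  by_cases hc : cur = []
  · subst hc
    simp only [pvStepA, pvStepB, pvJoinedLen_nil, ne_eq, not_true_eq_false, false_and,
      ite_false, List.nil_append]
    split_ifs <;> simp [pvJoinedLen_singleton]
  · have hlen := pvJoinedLen_append cur t hc
    simp only [pvStepA, pvStepB, ne_eq, hc, not_false_eq_true, if_pos, true_and]
    split_ifs with h1 h2 h2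
    · simp [pvJoinedLen_singleton]
    · exfalso; omega
    · exfalso; omega
    · simp only [Prod.mk.injEq]
      exact ⟨trivial, trivial, by omega⟩

theorem pv_fold_eq (max_length : Int) (terms : List String)
    (chunks : List (List String)) (cur : List String) :
    terms.foldl (pvStepA max_length) (chunks, cur, pvJoinedLen cur) =
      ((terms.foldl (pvStepB max_length) (chunks, cur)).1,
       (terms.foldl (pvStepB max_length) (chunks, cur)).2,
       pvJoinedLen ((terms.foldl (pvStepB max_length) (chunks, cur)).2)) := by
  induction terms generalizing chunks cur with
  | nil => simp
  | cons t rest ih =>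
    simp only [List.foldl_cons]
    rw [pv_step_eq]
    exact ih _ _

theorem chunk_eq (terms : List String) (max_length : Int) :
    chunk_terms_by_char_limit terms max_length = chunk_terms_by_char_limit_alt terms max_length := by
  unfold chunk_terms_by_char_limit chunk_terms_by_char_limit_alt
  rw [show (([], [], 0) : List (List String) × List String × Int)
      = ([], [], pvJoinedLen []) by rw [pvJoinedLen_nil], pv_fold_eq]

-- ===== VERDICT (by name: the statement is the Claim_ definition above) =====
theorem chunk_terms_by_char_limit_spec : Claim_equal_chunk_terms_by_char_limit := by
  intro terms max_length _
  unfold Spec_chunk_terms_by_char_limit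
  exact chunk_eq terms max_length
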